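-- pv_equiv track=rewrite | github.com/den1den/web-inf-ret-ml | preprocessing/preprocess_util.py | remove_strings
-- ===== SOURCE A (Python) =====
-- def remove_strings(s, remove_substrings):
--     """
--     :param s:
--     :param remove_substrings:
--     :return: new string, the difference in characters, number of replacement operations
--     """
--     n = len(s)
--     hits = 0
--     for find in remove_substrings:
--         i = 0
--         while True:
--             i = s.find(find, i)
--             if i == -1:
--                 break
--             s = s[0:i] + s[i + len(find):]
--             hits += 1
--     return s, n - len(s), hits
-- ===== SOURCE B (Python) =====
-- def remove_strings(s, remove_substrings):
--     """
--     :param s: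
--     :param remove_substrings:
--     :return: new string, the difference in characters, number of replacement operations
--     """
--     n = len(s)
--     hits = 0
--     for find in remove_substrings:
--         hits += s.count(find)
--         s = s.replace(find, '')
--     return s, n - len(s), hits
-- ===== Notes on version B (the rewrite author's own statement) =====
-- stated objective: idiomatic
-- what changed: A's hand-rolled inner find/slice-rebuild loop per substring is replaced by the stdlib pair s.count(find) / s.replace(find, ''), which performs the same greedy non-overlapping removal in one pass per substring.
import Mathlib
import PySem

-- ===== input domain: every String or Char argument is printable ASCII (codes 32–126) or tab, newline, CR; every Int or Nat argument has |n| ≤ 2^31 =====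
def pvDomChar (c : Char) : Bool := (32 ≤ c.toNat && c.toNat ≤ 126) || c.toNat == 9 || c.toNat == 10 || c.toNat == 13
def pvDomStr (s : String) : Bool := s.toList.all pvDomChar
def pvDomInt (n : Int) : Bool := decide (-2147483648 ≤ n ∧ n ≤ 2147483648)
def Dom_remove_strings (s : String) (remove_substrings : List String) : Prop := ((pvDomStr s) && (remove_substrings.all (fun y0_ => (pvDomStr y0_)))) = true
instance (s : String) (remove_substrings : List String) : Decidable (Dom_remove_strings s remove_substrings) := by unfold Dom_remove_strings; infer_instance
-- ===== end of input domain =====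

-- B replaces A's inner find/slice-rebuild loop entirely: per substring it just does
-- hits += s.count(find); s = s.replace(find, '') — the stdlib's greedy non-overlapping
-- removal — which is the idiomatic way to write this task in Python.


-- ===== PORT A =====
-- A's inner 'while True: i = s.find(find, i); if i == -1: break; s = s[0:i]+s[i+len(find):]; hits += 1'.
-- Fuel only makes the recursion total: under Pre_ (find ≠ "") each non-break step removes ≥ 1 char,
-- so fuel = len(s)+1 always suffices; for find = "" Python diverges (excluded by Pre_).
def removeLoopA (find : List Char) : Nat → List Char → Nat → Nat → List Char × Nat
  | 0, s, _, hits => (s, hits)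
  | fuel+1, s, i, hits =>
    let j : Int := PySem.Chars.findFrom s find (i : Int) none
    if j = -1 then (s, hits)
    else removeLoopA find fuel
      (PySem.List.slice s (some 0) (some j) ++ PySem.List.slice s (some (j + (find.length : Int))) none)
      j.toNat (hits + 1)

def remove_strings (s : String) (remove_substrings : List String) : String × Int × Int :=
  let n := s.toList.length
  let st := remove_substrings.foldl
    (fun (st : List Char × Nat) find => removeLoopA find.toList (st.1.length + 1) st.1 0 st.2)
    (s.toList, 0)
  (String.ofList st.1, (n : Int) - (st.1.length : Int), (st.2 : Int))

-- ===== PORT B =====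
-- B's for-loop 'hits += s.count(find); s = s.replace(find, "")' rendered as the obvious
-- structural recursion over remove_substrings carrying the (s, hits) state;
-- s.count / s.replace are the PySem ports of the Python builtins.
def removeAllB : List String → List Char → Nat → List Char × Nat
  | [], cs, hits => (cs, hits)
  | find :: rest, cs, hits =>
      removeAllB rest (PySem.Chars.replace cs find.toList []) (hits + PySem.Chars.count cs find.toList)

def remove_strings_alt (s : String) (remove_substrings : List String) : String × Int × Int :=
  let r := removeAllB remove_substrings s.toList 0
  (String.ofList r.1, (s.toList.length : Int) - (r.1.length : Int), (r.2 : Int))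

-- ===== PRECONDITION & SPEC =====
-- Pre_ excludes exactly the inputs where some substring to remove is empty: there Python A
-- ('' is found at every index, nothing is removed) loops forever and returns nothing.
def Pre_remove_strings (s : String) (remove_substrings : List String) : Prop :=
  ∀ f ∈ remove_substrings, f.toList ≠ []
instance (s : String) (remove_substrings : List String) : Decidable (Pre_remove_strings s remove_substrings) := by unfold Pre_remove_strings; infer_instance

def pvWitness_remove_strings : String × List String := ("abcab", ["ab", "c"])

def Spec_remove_strings (s : String) (remove_substrings : List String) (out : String × Int × Int) : Prop := out = remove_strings_alt s remove_substrings
instance (s : String) (remove_substrings : List String) (out : String × Int × Int) : Decidable (Spec_remove_strings s remove_substrings out) := by unfold Spec_remove_strings; infer_instance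

-- ===== CLAIM (what is proved, stated in full; the proofs are below) =====
def Claim_equal_remove_strings : Prop := ∀ (s : String) (remove_substrings : List String), Dom_remove_strings s remove_substrings → Pre_remove_strings s remove_substrings → Spec_remove_strings s remove_substrings (remove_strings s remove_substrings)

-- ===== LEMMAS AND PROOFS =====

-- proof device: the left-to-right character scan (greedy non-overlapping removal), the common
-- characterisation both ports are reduced to
def scanB (find : List Char) : Nat → List Char → List Char × Nat
  | 0, t => (t, 0)
  | _+1, [] => ([], 0)
  | fuel+1, c :: rest =>
    if PySem.Chars.startswith (c :: rest) find then
      let r := scanB find fuel ((c :: rest).drop find.length)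
      (r.1, r.2 + 1)
    else
      let r := scanB find fuel rest
      (c :: r.1, r.2)

-- a (nonempty) occurrence at position k fits inside t
lemma occ_len_le (find t : List Char) (hf : find ≠ []) (k : Nat)
    (hpre : find <+: t.drop k) : k + find.length ≤ t.length := by
  have h1 := hpre.length_le
  simp [List.length_drop] at h1
  have h2 : k ≤ t.length := by
    by_contra hc
    rw [Nat.not_le] at hc
    rw [List.drop_eq_nil_of_le (by omega)] at hpre
    exact hf (List.prefix_nil.mp hpre)
  omega

-- scanB does not depend on the fuel once the fuel covers the string length
lemma scanB_fuel (find : List Char) (hf : find ≠ []) :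
    ∀ (f1 : Nat) (t : List Char) (f2 : Nat), t.length ≤ f1 → t.length ≤ f2 →
      scanB find f1 t = scanB find f2 t := by
  intro f1
  induction f1 with
  | zero =>
    intro t f2 h1 _
    have : t = [] := List.length_eq_zero_iff.mp (Nat.le_zero.mp h1)
    subst this
    cases f2 <;> simp [scanB]
  | succ m ih =>
    intro t f2 h1 h2
    cases t with
    | nil => cases f2 <;> simp [scanB]
    | cons c rest =>
      cases f2 with
      | zero => simp at h2
      | succ g =>
        have hfl : 1 ≤ find.length := Nat.one_le_iff_ne_zero.mpr (by simpa using hf)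
        simp only [List.length_cons] at h1 h2
        simp only [scanB]
        split
        · rw [ih ((c :: rest).drop find.length) g (by simp; omega) (by simp; omega)]
        · rw [ih rest g (by omega) (by omega)]

-- when find does not occur in t, the scan copies t and counts nothing
lemma scanB_no (find : List Char) :
    ∀ (fuel : Nat) (t : List Char), ¬ find <:+: t → t.length ≤ fuel →
      scanB find fuel t = (t, 0) := by
  intro fuel
  induction fuel with
  | zero => intro t _ _; simp [scanB]
  | succ m ih =>
    intro t hno hl
    cases t with
    | nil => simp [scanB]
    | cons c rest =>
      have hsw : ¬ PySem.Chars.startswith (c :: rest) find = true := by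
        intro h
        exact hno ((PySem.Chars.startswith_iff _ _).mp h).isInfix
      simp only [scanB]
      rw [ih rest (fun h => hno (List.infix_cons h)) (by simp at hl; omega)]
      simp [hsw]

-- when the FIRST occurrence of find in t is at position k, the scan copies t[:k], skips find, recurses
lemma scanB_occ (find : List Char) (hf : find ≠ []) :
    ∀ (k : Nat) (t : List Char) (fuel : Nat),
      find <+: t.drop k → (∀ i, i < k → ¬ find <+: t.drop i) → t.length ≤ fuel →
      scanB find fuel t =
        (t.take k ++ (scanB find (t.drop (k + find.length)).length (t.drop (k + find.length))).1,
         (scanB find (t.drop (k + find.length)).length (t.drop (k + find.length))).2 + 1) := by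
  intro k
  induction k with
  | zero =>
    intro t fuel hpre _ hl
    have hfl : 1 ≤ find.length := Nat.one_le_iff_ne_zero.mpr (by simpa using hf)
    have htne : t ≠ [] := by
      intro h; subst h; simp at hpre
      exact hf hpre
    cases t with
    | nil => exact absurd rfl htne
    | cons c rest =>
      cases fuel with
      | zero => simp at hl
      | succ m =>
        have hsw : PySem.Chars.startswith (c :: rest) find = true :=
          (PySem.Chars.startswith_iff _ _).mpr (by simpa using hpre)
        simp only [scanB, hsw, if_true, List.take_zero, List.nil_append, Nat.zero_add]
        rw [scanB_fuel find hf m ((c :: rest).drop find.length) ((c :: rest).drop find.length).length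
          (by simp at hl ⊢; omega) (le_refl _)]
  | succ k ih =>
    intro t fuel hpre hmin hl
    have hfl : 1 ≤ find.length := Nat.one_le_iff_ne_zero.mpr (by simpa using hf)
    cases t with
    | nil =>
      simp at hpre
      exact absurd hpre hf
    | cons c rest =>
      cases fuel with
      | zero => simp at hl
      | succ m =>
        have hsw : ¬ PySem.Chars.startswith (c :: rest) find = true := by
          intro h
          exact hmin 0 (Nat.succ_pos k) (by simpa using (PySem.Chars.startswith_iff _ _).mp h)
        simp only [scanB, hsw]
        rw [ih rest m (by simpa using hpre)
          (fun i hi => by simpa using hmin (i+1) (by omega)) (by simp at hl; omega)]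
        simp [List.take_succ_cons, List.drop_succ_cons, Nat.succ_add]

-- Python's str.count (greedy non-overlapping) is the scan's counter
lemma count_go_eq (sub : List Char) :
    ∀ (fuel : Nat) (l : List Char) (acc : Nat),
      PySem.Chars.count.go sub fuel l acc = acc + (scanB sub fuel l).2 := by
  intro fuel
  induction fuel with
  | zero => intro l acc; cases l <;> simp [PySem.Chars.count.go, scanB]
  | succ m ih =>
    intro l acc
    cases l with
    | nil => simp [PySem.Chars.count.go, scanB]
    | cons c t =>
      have hsw : sub.isPrefixOf (c :: t) = PySem.Chars.startswith (c :: t) sub := by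
        by_cases h : sub <+: (c :: t)
        · rw [List.isPrefixOf_iff_prefix.mpr h, ((PySem.Chars.startswith_iff _ _).mpr h)]
        · rw [Bool.eq_false_iff.mpr (fun hh => h (List.isPrefixOf_iff_prefix.mp hh)),
            Bool.eq_false_iff.mpr (fun hh => h ((PySem.Chars.startswith_iff _ _).mp hh))]
      simp only [PySem.Chars.count.go, scanB, hsw]
      split
      · rw [ih]; omega
      · rw [ih]

-- Python's str.replace(old, '') (greedy non-overlapping) is the scan's output string
lemma replace_go_eq (sub : List Char) :
    ∀ (fuel : Nat) (l : List Char) (acc : List Char),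
      PySem.Chars.replace.go sub [] fuel l acc = acc.reverse ++ (scanB sub fuel l).1 := by
  intro fuel
  induction fuel with
  | zero => intro l acc; cases l <;> simp [PySem.Chars.replace.go, scanB]
  | succ m ih =>
    intro l acc
    cases l with
    | nil => simp [PySem.Chars.replace.go, scanB]
    | cons c t =>
      have hsw : sub.isPrefixOf (c :: t) = PySem.Chars.startswith (c :: t) sub := by
        by_cases h : sub <+: (c :: t)
        · rw [List.isPrefixOf_iff_prefix.mpr h, ((PySem.Chars.startswith_iff _ _).mpr h)]
        · rw [Bool.eq_false_iff.mpr (fun hh => h (List.isPrefixOf_iff_prefix.mp hh)),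
            Bool.eq_false_iff.mpr (fun hh => h ((PySem.Chars.startswith_iff _ _).mp hh))]
      simp only [PySem.Chars.replace.go, scanB, hsw]
      split
      · rw [ih]; simp
      · rw [ih]; simp

lemma count_eq_scan (sub l : List Char) (hf : sub ≠ []) :
    PySem.Chars.count l sub = (scanB sub l.length l).2 := by
  rw [PySem.Chars.count, if_neg (by simpa using hf), count_go_eq]
  simp

lemma replace_eq_scan (sub l : List Char) (hf : sub ≠ []) :
    PySem.Chars.replace l sub [] = (scanB sub l.length l).1 := by
  rw [PySem.Chars.replace, if_neg (by simpa using hf), replace_go_eq]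
  simp

-- the heart: A's find/delete loop from index |P| on P ++ T equals P ++ (the scan of T)
lemma loopA_eq (find : List Char) (hf : find ≠ []) :
    ∀ (fuel : Nat) (T P : List Char) (hits : Nat), T.length < fuel →
      removeLoopA find fuel (P ++ T) P.length hits
        = (P ++ (scanB find T.length T).1, hits + (scanB find T.length T).2) := by
  intro fuel
  induction fuel with
  | zero => intro T P hits h; omega
  | succ m ih =>
    intro T P hits hl
    have hfl : 1 ≤ find.length := Nat.one_le_iff_ne_zero.mpr (by simpa using hf)
    have hk : P.length ≤ (P ++ T).length := by simp
    have hdrop : (P ++ T).drop P.length = T := by simp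
    simp only [removeLoopA]
    rw [PySem.Chars.findFrom_natCast (P ++ T) find P.length hk, hdrop]
    by_cases hF : PySem.Chars.find T find = -1
    · simp only [hF, if_true]
      rw [scanB_no find T.length T ((PySem.Chars.find_eq_neg_one_iff T find).mp hF) (le_refl _)]
      simp
    · have hF0 : 0 ≤ PySem.Chars.find T find := by
        have := PySem.Chars.neg_one_le_find T find
        omega
      set F := PySem.Chars.find T find with hFdef
      set k := F.toNat with hkdef
      have hFk : F = (k : Int) := by omega
      obtain ⟨hpre, hmin⟩ := PySem.Chars.find_spec hF0
      have hklen : k + find.length ≤ T.length := occ_len_le find T hf k hpre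
      rw [if_neg hF, if_neg (show ¬((P.length : Int) + F = -1) by omega)]
      have hj : ((P.length : Int) + F) = ((P.length + k : Nat) : Int) := by
        rw [hFk]; push_cast; ring
      have hslice1 : PySem.List.slice (P ++ T) (some 0) (some ((P.length : Int) + F))
          = P ++ T.take k := by
        rw [hj]
        rw [PySem.List.slice_zero_start, PySem.List.slice_to_natCast]
        rw [List.take_append, List.take_of_length_le (Nat.le_add_right P.length k)]
        simp
      have hslice2 : PySem.List.slice (P ++ T) (some ((P.length : Int) + F + (find.length : Int))) none
          = T.drop (k + find.length) := by
        have : (P.length : Int) + F + (find.length : Int) = ((P.length + (k + find.length) : Nat) : Int) := by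
          rw [hFk]; push_cast; ring
        rw [this, PySem.List.slice_from_natCast, List.drop_append,
          List.drop_eq_nil_of_le (Nat.le_add_right P.length (k + find.length)), List.nil_append]
        simp
      have hi : ((P.length : Int) + F).toNat = (P ++ T.take k).length := by
        rw [hFk]
        simp [List.length_append, List.length_take]
        omega
      rw [hslice1, hslice2, hi]
      have hTne : 1 ≤ T.length := by omega
      have ihres := ih (T.drop (k + find.length)) (P ++ T.take k) (hits + 1)
        (by simp [List.length_drop]; omega)
      rw [ihres]
      rw [scanB_occ find hf k T T.length hpre hmin (le_refl _)]
      simp [List.append_assoc]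
      omega

-- A's fold over remove_substrings equals B's recursion over remove_substrings
lemma fold_eq (finds : List String) :
    ∀ (cs : List Char) (hits : Nat), (∀ f ∈ finds, f.toList ≠ []) →
      finds.foldl (fun (st : List Char × Nat) find => removeLoopA find.toList (st.1.length + 1) st.1 0 st.2) (cs, hits)
        = removeAllB finds cs hits := by
  induction finds with
  | nil => intro cs hits _; rfl
  | cons f fs ih =>
    intro cs hits hpre
    have hf : f.toList ≠ [] := hpre f (List.mem_cons_self)
    have step := loopA_eq f.toList hf (cs.length + 1) cs [] hits (by omega)
    simp only [List.nil_append, List.length_nil] at step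
    simp only [List.foldl_cons, removeAllB, step,
      count_eq_scan f.toList cs hf, replace_eq_scan f.toList cs hf]
    exact ih _ _ (fun g hg => hpre g (List.mem_cons_of_mem f hg))

-- ===== VERDICT (by name: the statement is the Claim_ definition above) =====
theorem remove_strings_spec : Claim_equal_remove_strings := by
  intro s finds _ hpre
  unfold Spec_remove_strings remove_strings remove_strings_alt
  rw [fold_eq finds s.toList 0 hpre]
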